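-- pv_equiv track=rewrite | github.com/ysgrPrograming/goblet | gobblet.py | judge_states_end
-- ===== SOURCE A (Python) =====
-- judge_sets = [{1, 2, 3}, {4, 5, 6}, {7, 8, 9}, {1, 4, 7}, {2, 5, 8}, {3, 6, 9}, {1, 5, 9}, {3, 5, 7}]
--
-- def judge_states_end(states):
--     #隠れている駒を掃き出しつつ駒の位置を集合にまとめる
--     player_set, enemy_set = set(), set()
--     for i in reversed(range(3)):
--         player_set |= set(states[i*2:i*2+2]) - enemy_set
--         enemy_set |= set(states[i*2+6:i*2+8]) - player_set
--
--     player_flag, enemy_flag = False, False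
--     #judge_setsのパターンに合致していれば評価値を返す
--     for judge in judge_sets:
--         if judge <= player_set:
--             if enemy_flag:
--                 enemy_flag = False
--                 break
--             else:
--                 player_flag = True
--         if judge <= enemy_set:
--             if player_flag:
--                 player_flag = False
--                 break
--             else:
--                 enemy_flag = True
--     if player_flag:
--         return 1
--     elif enemy_flag:
--         return -1
--     else:
--         return None
-- ===== SOURCE B (Python) =====
-- LINES = [(1, 2, 3), (4, 5, 6), (7, 8, 9), (1, 4, 7), (2, 5, 8), (3, 6, 9), (1, 5, 9), (3, 5, 7)]
--
-- # priority scan: larger pieces first, player slice before enemy slice at each size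
-- PRIORITIES = ((4, 1), (10, -1), (2, 1), (8, -1), (0, 1), (6, -1))
--
-- def _owner(states, v):
--     # side owning cell v = side of v's first occurrence in priority order (0 = nobody)
--     for start, side in PRIORITIES:
--         if v in states[start:start + 2]:
--             return side
--     return 0
--
-- def judge_states_end(states):
--     player_win = any(all(_owner(states, c) == 1 for c in line) for line in LINES)
--     enemy_win = any(all(_owner(states, c) == -1 for c in line) for line in LINES)
--     if player_win == enemy_win:
--         return None
--     return 1 if player_win else -1
-- ===== Notes on version B (the rewrite author's own statement) =====
-- stated objective: alternative
-- what changed: Instead of A's reversed set-difference sweep plus a stateful flag/break judging loop, B computes each cell's owner directly by a first-match priority scan over the six slices and decides win/loss with two stateless any/all line scans combined by one boolean rule.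
import Mathlib
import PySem

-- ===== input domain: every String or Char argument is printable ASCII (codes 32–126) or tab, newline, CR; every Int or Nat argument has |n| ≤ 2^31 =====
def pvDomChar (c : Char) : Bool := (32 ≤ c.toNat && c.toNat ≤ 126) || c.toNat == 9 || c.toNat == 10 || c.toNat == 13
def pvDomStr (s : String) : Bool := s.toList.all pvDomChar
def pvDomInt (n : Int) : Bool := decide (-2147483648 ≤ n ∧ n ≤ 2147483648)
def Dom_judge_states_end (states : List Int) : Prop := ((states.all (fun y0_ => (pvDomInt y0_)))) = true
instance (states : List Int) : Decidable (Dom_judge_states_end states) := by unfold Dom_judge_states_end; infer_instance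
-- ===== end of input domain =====

-- B replaces A's reversed set-difference sweep and stateful flag/break judging loop by a
-- per-cell first-match ownership scan and two stateless any/all line scans; objective: alternative.

-- ===== PORT A =====
-- module-level constant judge_sets of A
def judgeSets : List (PySem.Set Int) :=
  [PySem.Set.ofList [1, 2, 3], PySem.Set.ofList [4, 5, 6], PySem.Set.ofList [7, 8, 9],
   PySem.Set.ofList [1, 4, 7], PySem.Set.ofList [2, 5, 8], PySem.Set.ofList [3, 6, 9],
   PySem.Set.ofList [1, 5, 9], PySem.Set.ofList [3, 5, 7]]

-- A's first loop: sweep hidden pieces into (player_set, enemy_set)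
def buildSets (states : List Int) : PySem.Set Int × PySem.Set Int :=
  (PySem.List.pyRange 0 3 1).reverse.foldl
    (fun (acc : PySem.Set Int × PySem.Set Int) i =>
      let ps := PySem.Set.union acc.1
        (PySem.Set.diff (PySem.Set.ofList (PySem.List.slice states (some (i*2)) (some (i*2+2)))) acc.2)
      let es := PySem.Set.union acc.2
        (PySem.Set.diff (PySem.Set.ofList (PySem.List.slice states (some (i*2+6)) (some (i*2+8)))) ps)
      (ps, es))
    (PySem.Set.empty, PySem.Set.empty)

-- A's judging loop: two mutually cancelling flags with break; returns the final flags
def judgeLoopA (l : List (PySem.Set Int)) (ps es : PySem.Set Int) (pf ef : Bool) : Bool × Bool :=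
  match l with
  | [] => (pf, ef)
  | j :: rest =>
    if PySem.Set.issubset j ps then
      if ef then (pf, false)                 -- enemy_flag = False; break
      else
        -- player_flag = True, then fall through to the second if
        if PySem.Set.issubset j es then
          (false, ef)                        -- player_flag = False; break (pf was just set True)
        else judgeLoopA rest ps es true ef
    else
      if PySem.Set.issubset j es then
        if pf then (false, ef)               -- player_flag = False; break
        else judgeLoopA rest ps es pf true
      else judgeLoopA rest ps es pf ef

def judge_states_end (states : List Int) : Option Int :=
  let sets := buildSets states
  let flags := judgeLoopA judgeSets sets.1 sets.2 false false
  if flags.1 then some 1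
  else if flags.2 then some (-1)
  else none

-- ===== PORT B =====
-- B's LINES constant: plain lists of cells
def linesB : List (List Int) :=
  [[1, 2, 3], [4, 5, 6], [7, 8, 9], [1, 4, 7], [2, 5, 8], [3, 6, 9], [1, 5, 9], [3, 5, 7]]

-- B's PRIORITIES constant: (slice start, owning side), larger pieces first
def priosB : List (Int × Int) := [(4, 1), (10, -1), (2, 1), (8, -1), (0, 1), (6, -1)]

-- _owner: early-return loop over the priorities, as structural recursion
def ownerScan (states : List Int) (v : Int) : List (Int × Int) → Int
  | [] => 0
  | (start, side) :: rest =>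
    if (PySem.List.slice states (some start) (some (start + 2))).contains v then side
    else ownerScan states v rest

def ownerB (states : List Int) (v : Int) : Int := ownerScan states v priosB

def judge_states_end_alt (states : List Int) : Option Int :=
  let playerWin := linesB.any (fun line => line.all (fun c => ownerB states c == 1))
  let enemyWin := linesB.any (fun line => line.all (fun c => ownerB states c == -1))
  if playerWin == enemyWin then none
  else if playerWin then some 1 else some (-1)

-- ===== PRECONDITION & SPEC =====
def Spec_judge_states_end (states : List Int) (out : Option Int) : Prop := out = judge_states_end_alt states
instance (states : List Int) (out : Option Int) : Decidable (Spec_judge_states_end states out) := by unfold Spec_judge_states_end; infer_instance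

-- ===== CLAIM (what is proved, stated in full; the proofs are below) =====
def Claim_equal_judge_states_end : Prop := ∀ (states : List Int), Dom_judge_states_end states → Spec_judge_states_end states (judge_states_end states)

-- ===== LEMMAS AND PROOFS =====

lemma pyRange03 : (PySem.List.pyRange 0 3 1).reverse = [2, 1, 0] := by decide

lemma mem_ps_iff (states : List Int) (v : Int) :
    v ∈ (buildSets states).1 ↔ ownerB states v = 1 := by
  simp only [buildSets, pyRange03, List.foldl]
  norm_num [PySem.Set.mem_union, PySem.Set.mem_diff, PySem.Set.mem_ofList, PySem.Set.empty,
    ownerB, ownerScan, priosB]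
  by_cases h1 : v ∈ PySem.List.slice states (some 4) (some 6) <;>
  by_cases h2 : v ∈ PySem.List.slice states (some 10) (some 12) <;>
  by_cases h3 : v ∈ PySem.List.slice states (some 2) (some 4) <;>
  by_cases h4 : v ∈ PySem.List.slice states (some 8) (some 10) <;>
  by_cases h5 : v ∈ PySem.List.slice states (some 0) (some 2) <;>
  by_cases h6 : v ∈ PySem.List.slice states (some 6) (some 8) <;>
    simp_all

lemma mem_es_iff (states : List Int) (v : Int) :
    v ∈ (buildSets states).2 ↔ ownerB states v = -1 := by
  simp only [buildSets, pyRange03, List.foldl]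
  norm_num [PySem.Set.mem_union, PySem.Set.mem_diff, PySem.Set.mem_ofList, PySem.Set.empty,
    ownerB, ownerScan, priosB]
  by_cases h1 : v ∈ PySem.List.slice states (some 4) (some 6) <;>
  by_cases h2 : v ∈ PySem.List.slice states (some 10) (some 12) <;>
  by_cases h3 : v ∈ PySem.List.slice states (some 2) (some 4) <;>
  by_cases h4 : v ∈ PySem.List.slice states (some 8) (some 10) <;>
  by_cases h5 : v ∈ PySem.List.slice states (some 0) (some 2) <;>
  by_cases h6 : v ∈ PySem.List.slice states (some 6) (some 8) <;>
    simp_all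

lemma judgeLoopA_tf (l : List (PySem.Set Int)) (ps es : PySem.Set Int) :
    judgeLoopA l ps es true false =
      (if l.any (fun j => PySem.Set.issubset j es) then (false, false) else (true, false)) := by
  induction l with
  | nil => simp [judgeLoopA]
  | cons j rest ih =>
    simp only [judgeLoopA, List.any_cons]
    by_cases hp : PySem.Set.issubset j ps = true <;> by_cases he : PySem.Set.issubset j es = true <;>
      simp [hp, he, ih]

lemma judgeLoopA_ft (l : List (PySem.Set Int)) (ps es : PySem.Set Int) :
    judgeLoopA l ps es false true =
      (if l.any (fun j => PySem.Set.issubset j ps) then (false, false) else (false, true)) := by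
  induction l with
  | nil => simp [judgeLoopA]
  | cons j rest ih =>
    simp only [judgeLoopA, List.any_cons]
    by_cases hp : PySem.Set.issubset j ps = true <;> by_cases he : PySem.Set.issubset j es = true <;>
      simp [hp, he, ih]

lemma judgeLoopA_ff (l : List (PySem.Set Int)) (ps es : PySem.Set Int) :
    judgeLoopA l ps es false false =
      (l.any (fun j => PySem.Set.issubset j ps) && !(l.any (fun j => PySem.Set.issubset j es)),
       l.any (fun j => PySem.Set.issubset j es) && !(l.any (fun j => PySem.Set.issubset j ps))) := by
  induction l with
  | nil => simp [judgeLoopA]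
  | cons j rest ih =>
    simp only [judgeLoopA, List.any_cons]
    cases hp : PySem.Set.issubset j ps <;> cases he : PySem.Set.issubset j es
    · simp [ih]
    · cases hb : rest.any (fun j => PySem.Set.issubset j ps) <;>
        simp [hb, judgeLoopA_ft]
    · cases hb : rest.any (fun j => PySem.Set.issubset j es) <;>
        simp [hb, judgeLoopA_tf]
    · simp

lemma subset_all_ps (states : List Int) (l : List Int) :
    PySem.Set.issubset (PySem.Set.ofList l) (buildSets states).1 =
      l.all (fun c => ownerB states c == 1) := by
  rw [Bool.eq_iff_iff, PySem.Set.issubset_iff, List.all_eq_true]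
  simp [PySem.Set.mem_ofList, mem_ps_iff]

lemma subset_all_es (states : List Int) (l : List Int) :
    PySem.Set.issubset (PySem.Set.ofList l) (buildSets states).2 =
      l.all (fun c => ownerB states c == -1) := by
  rw [Bool.eq_iff_iff, PySem.Set.issubset_iff, List.all_eq_true]
  simp [PySem.Set.mem_ofList, mem_es_iff]

lemma any_subset_ps (states : List Int) :
    judgeSets.any (fun j => PySem.Set.issubset j (buildSets states).1) =
      linesB.any (fun line => line.all (fun c => ownerB states c == 1)) := by
  simp only [judgeSets, linesB, List.any_cons, List.any_nil, subset_all_ps]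

lemma any_subset_es (states : List Int) :
    judgeSets.any (fun j => PySem.Set.issubset j (buildSets states).2) =
      linesB.any (fun line => line.all (fun c => ownerB states c == -1)) := by
  simp only [judgeSets, linesB, List.any_cons, List.any_nil, subset_all_es]

-- ===== VERDICT (by name: the statement is the Claim_ definition above) =====
theorem judge_states_end_spec : Claim_equal_judge_states_end := by
  intro states _
  unfold Spec_judge_states_end
  simp only [judge_states_end, judge_states_end_alt, judgeLoopA_ff,
    any_subset_ps, any_subset_es]
  cases hp : linesB.any (fun line => line.all (fun c => ownerB states c == 1)) <;>
    cases he : linesB.any (fun line => line.all (fun c => ownerB states c == -1)) <;> simp
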